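-- pv_equiv track=rewrite | github.com/rebuilder945/FL_research | ast_research/python_code_5.23/lastterm_page7/success_code/张会-3225-2023-04-17_15_25_22.py | work
-- ===== SOURCE A (Python) =====
-- def work(a) :
--     m = {0:1}
--     b=1
--     for i in range(1,a):
--         for j in range(i):
--                 b=b*(j+1)
--         m[i]=b
--     return m
-- ===== SOURCE B (Python) =====
-- def work(a):
--     n = a if a > 1 else 1
--     facts = [1]
--     for i in range(1, n):
--         facts.append(facts[-1] * i)
--     sfs = [1]
--     for f in facts[1:]:
--         sfs.append(sfs[-1] * f)
--     return dict(enumerate(sfs))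
-- ===== Notes on version B (the rewrite author's own statement) =====
-- stated objective: alternative
-- what changed: B replaces A's nested loop and incrementally-built dict with three staged passes: a factorial list built by appends, a prefix-product list over its tail, and dict(enumerate(...)); O(a) multiplications vs A's O(a^2).
import Mathlib
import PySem

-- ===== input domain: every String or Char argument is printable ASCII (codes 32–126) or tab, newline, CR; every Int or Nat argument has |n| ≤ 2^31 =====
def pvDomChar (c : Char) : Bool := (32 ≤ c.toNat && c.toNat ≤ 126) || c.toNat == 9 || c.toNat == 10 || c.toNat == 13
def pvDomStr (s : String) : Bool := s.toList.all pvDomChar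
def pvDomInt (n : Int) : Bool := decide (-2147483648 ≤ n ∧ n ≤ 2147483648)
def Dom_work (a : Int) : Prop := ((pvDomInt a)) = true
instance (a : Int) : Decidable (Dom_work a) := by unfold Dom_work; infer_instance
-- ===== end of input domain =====

-- B rebuilds the same superfactorial table in three staged passes (a factorial list built by
-- appends, a prefix-product list over its tail, then enumerate) instead of A's nested loop over
-- an incrementally built dict; a structural/algorithmic change, speed not claimed.

-- ===== PORT A =====
-- one iteration of A's outer loop: recompute b by the inner loop 'for j in range(i): b = b*(j+1)', then m[i] = b
def workStep (st : PySem.Dict Int Int × Int) (i : Int) : PySem.Dict Int Int × Int :=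
  let b := (PySem.List.pyRange 0 i 1).foldl (fun b j => b * (j + 1)) st.2
  (st.1.insert i b, b)

def work (a : Int) : List (Int × Int) :=
  ((PySem.List.pyRange 1 a 1).foldl workStep ((PySem.Dict.empty.insert 0 1 : PySem.Dict Int Int), 1)).1.items

-- ===== PORT B =====
-- pass 1: 'for i in range(1, n): facts.append(facts[-1] * i)' starting from [1], n = a if a > 1 else 1
-- pass 2: 'for f in facts[1:]: sfs.append(sfs[-1] * f)' starting from [1]
-- pass 3: 'dict(enumerate(sfs))' — keys 0,1,2,… are distinct, so its items are enumerate(sfs)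
def work_alt (a : Int) : List (Int × Int) :=
  PySem.List.enumerate
    ((PySem.List.slice
        ((PySem.List.pyRange 1 (if a > 1 then a else 1) 1).foldl
          (fun fs i => fs ++ [fs.getLast! * i]) [(1 : Int)])
        (some 1) none).foldl
      (fun ss f => ss ++ [ss.getLast! * f]) [(1 : Int)])

-- ===== PRECONDITION & SPEC =====
def Spec_work (a : Int) (out : List (Int × Int)) : Prop := out = work_alt a
instance (a : Int) (out : List (Int × Int)) : Decidable (Spec_work a out) := by unfold Spec_work; infer_instance

-- ===== CLAIM (what is proved, stated in full; the proofs are below) =====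
def Claim_equal_work : Prop := ∀ (a : Int), Dom_work a → Spec_work a (work a)

-- ===== LEMMAS AND PROOFS =====

-- superfactorial: sfact n = 1! * 2! * … * n!
def sfact : Nat → Int
  | 0 => 1
  | n + 1 => sfact n * ((n + 1).factorial : Int)

-- the canonical table both programs compute
def table (n : Nat) : List (Int × Int) := (List.range n).map (fun (k : Nat) => ((k : Int), sfact k))

lemma getLast!_append_singleton (l : List Int) (x : Int) : (l ++ [x]).getLast! = x := by
  cases l with
  | nil => rfl
  | cons a t => simp [List.getLast!]

-- A's inner loop multiplies the accumulator by k!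
lemma inner_fact (k : Nat) (b : Int) :
    (PySem.List.pyRange 0 (k : Int) 1).foldl (fun b j => b * (j + 1)) b
      = b * (Nat.factorial k : Int) := by
  induction k generalizing b with
  | zero => simp [PySem.List.pyRange_one_eq_nil, Nat.factorial]
  | succ k ih =>
      have h : ((k + 1 : Nat) : Int) = (k : Int) + 1 := by push_cast; ring
      rw [h, PySem.List.pyRange_one_succ_right (by omega), List.foldl_append, ih]
      simp [Nat.factorial]
      ring

-- A's outer loop builds exactly the canonical table, with b = sfact m
lemma A_inv (m : Nat) :
    (PySem.List.pyRange 1 (1 + (m : Int)) 1).foldl workStep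
        ((PySem.Dict.empty.insert 0 1 : PySem.Dict Int Int), 1)
      = (PySem.Dict.mk (table (m + 1)), sfact m) := by
  induction m with
  | zero =>
      simp [PySem.List.pyRange_one_eq_nil, table, sfact]
      rfl
  | succ m ih =>
      have h : 1 + ((m + 1 : Nat) : Int) = (1 + (m : Int)) + 1 := by push_cast; ring
      rw [h, PySem.List.pyRange_one_succ_right (by omega), List.foldl_append, ih]
      simp only [List.foldl_cons, List.foldl_nil, workStep]
      have hidx : (1 + (m : Int)) = ((m + 1 : Nat) : Int) := by push_cast; ring
      rw [hidx, inner_fact]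
      have hfresh : (PySem.Dict.mk (table (m + 1))).contains ((m + 1 : Nat) : Int) = false := by
      -- no key of table (m+1) equals m+1
        simp only [table, PySem.Dict.contains_mk, List.any_map, List.any_eq_false,
          Function.comp]
        intro k hk
        simp only [List.mem_range] at hk
        simpa using (by exact_mod_cast Nat.ne_of_lt hk : (k : Int) ≠ ((m + 1 : Nat) : Int))
      refine Prod.ext ?_ rfl
      apply PySem.Dict.ext
      rw [PySem.Dict.items_insert_of_not_contains _ _ hfresh]
      simp only [table, List.range_succ (n := m + 1), List.map_append]
      simp [sfact]

-- B's first loop builds the factorial list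
lemma facts_inv (m : Nat) :
    (PySem.List.pyRange 1 (1 + (m : Int)) 1).foldl (fun fs i => fs ++ [fs.getLast! * i]) [(1 : Int)]
      = (List.range (m + 1)).map (fun (k : Nat) => (k.factorial : Int)) := by
  induction m with
  | zero => simp [PySem.List.pyRange_one_eq_nil]
  | succ m ih =>
      have h : 1 + ((m + 1 : Nat) : Int) = (1 + (m : Int)) + 1 := by push_cast; ring
      rw [h, PySem.List.pyRange_one_succ_right (by omega), List.foldl_append, ih]
      simp only [List.foldl_cons, List.foldl_nil]
      have hlast : ((List.range (m + 1)).map (fun (k : Nat) => (k.factorial : Int))).getLast!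
          = (m.factorial : Int) := by
        rw [List.range_succ (n := m), List.map_append]
        exact getLast!_append_singleton _ _
      rw [hlast, List.range_succ (n := m + 1), List.map_append]
      congr 1
      have hf : (((m + 1).factorial : Nat) : Int) = (m.factorial : Int) * (1 + (m : Int)) := by
        push_cast [Nat.factorial_succ]; ring
      simp [hf]

-- B's second loop turns the factorial tail into the superfactorial list
lemma sfs_inv (m : Nat) :
    ((List.range m).map (fun (k : Nat) => ((k + 1).factorial : Int))).foldl
        (fun ss f => ss ++ [ss.getLast! * f]) [(1 : Int)]
      = (List.range (m + 1)).map (fun (k : Nat) => sfact k) := by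
  induction m with
  | zero => simp [sfact]
  | succ m ih =>
      rw [List.range_succ (n := m), List.map_append, List.foldl_append, ih]
      simp only [List.map_cons, List.map_nil, List.foldl_cons, List.foldl_nil]
      have hlast : ((List.range (m + 1)).map (fun (k : Nat) => sfact k)).getLast! = sfact m := by
        rw [List.range_succ (n := m), List.map_append]
        exact getLast!_append_singleton _ _
      rw [hlast, List.range_succ (n := m + 1), List.map_append]
      congr 1

-- enumerating a range-map gives the indexed pairs
lemma enumerate_range_map (h : Nat → Int) (n : Nat) (s : Int) :
    PySem.List.enumerate ((List.range n).map h) s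
      = (List.range n).map (fun (k : Nat) => (s + (k : Int), h k)) := by
  induction n generalizing h s with
  | zero => simp
  | succ n ih =>
      rw [List.range_succ_eq_map]
      simp only [List.map_cons, List.map_map, PySem.List.enumerate_cons]
      rw [ih (h ∘ Nat.succ) (s + 1)]
      congr 1
      · simp
      · apply List.map_congr_left
        intro k _
        simp only [Function.comp_apply]
        refine Prod.ext ?_ rfl
        push_cast; ring

-- ===== VERDICT (by name: the statement is the Claim_ definition above) =====
theorem work_spec : Claim_equal_work := by
  intro a _
  unfold Spec_work work work_alt
  by_cases h : a > 1
  · obtain ⟨m, rfl⟩ : ∃ m : Nat, a = 1 + (m : Int) := ⟨(a - 1).toNat, by omega⟩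
    have hn : (if (1 + (m : Int)) > 1 then 1 + (m : Int) else 1) = 1 + (m : Int) := by
      simp [h]
    rw [hn, A_inv, facts_inv, PySem.List.slice_from_one]
    rw [List.range_succ_eq_map, List.map_cons, List.tail_cons, List.map_map]
    have hcomp : ((List.range m).map ((fun (k : Nat) => (k.factorial : Int)) ∘ Nat.succ))
        = (List.range m).map (fun (k : Nat) => ((k + 1).factorial : Int)) := rfl
    rw [hcomp, sfs_inv, enumerate_range_map]
    simp [table]
  · have hn : (if a > 1 then a else 1) = 1 := by simp [h]
    rw [PySem.List.pyRange_one_eq_nil (by omega), hn,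
        PySem.List.pyRange_one_eq_nil (by omega)]
    decide
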